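-- pv_equiv track=rewrite | github.com/kss2002/techGiterview | src/backend/app/agents/enhanced_question_generator.py | _select_files_within_budget
-- ===== SOURCE A (Python) =====
-- from typing import Dict, List, Any, Optional, Tuple
--
-- def _select_files_within_budget(
--
--     file_tokens: Dict[str, int],
--     available_tokens: int
-- ) -> List[str]:
--     """토큰 예산 내 파일 선택"""
--
--     # 토큰 수 기준으로 정렬 (적은 것부터)
--     sorted_files = sorted(file_tokens.items(), key=lambda x: x[1])
--
--     selected_files = []
--     current_tokens = 0
--
--     for file_path, tokens in sorted_files:
--         if current_tokens + tokens <= available_tokens: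
--             selected_files.append(file_path)
--             current_tokens += tokens
--         else:
--             break
--
--     return selected_files
-- ===== SOURCE B (Python) =====
-- def _select_files_within_budget(
--     file_tokens,
--     available_tokens
-- ):
--     """토큰 예산 내 파일 선택 — prefix-sum table, then count the leading fits and slice."""
--     items = sorted(file_tokens.items(), key=lambda x: x[1])
--     # phase 1: prefix-sum table of token counts
--     prefix = []
--     total = 0
--     for _, tokens in items:
--         total += tokens
--         prefix.append(total)
--     # phase 2: number of leading prefix sums within budget
--     k = 0
--     while k < len(prefix) and prefix[k] <= available_tokens:
--         k += 1
--     # phase 3: slice out the selected paths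
--     return [path for path, _ in items[:k]]
-- ===== Notes on version B (the rewrite author's own statement) =====
-- stated objective: alternative
-- what changed: Replaces A's single accumulate-append-break loop by a three-phase pipeline: build a prefix-sum table of the sorted token counts, count how many leading prefix sums fit the budget, then slice that many paths off the sorted list.
import Mathlib
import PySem

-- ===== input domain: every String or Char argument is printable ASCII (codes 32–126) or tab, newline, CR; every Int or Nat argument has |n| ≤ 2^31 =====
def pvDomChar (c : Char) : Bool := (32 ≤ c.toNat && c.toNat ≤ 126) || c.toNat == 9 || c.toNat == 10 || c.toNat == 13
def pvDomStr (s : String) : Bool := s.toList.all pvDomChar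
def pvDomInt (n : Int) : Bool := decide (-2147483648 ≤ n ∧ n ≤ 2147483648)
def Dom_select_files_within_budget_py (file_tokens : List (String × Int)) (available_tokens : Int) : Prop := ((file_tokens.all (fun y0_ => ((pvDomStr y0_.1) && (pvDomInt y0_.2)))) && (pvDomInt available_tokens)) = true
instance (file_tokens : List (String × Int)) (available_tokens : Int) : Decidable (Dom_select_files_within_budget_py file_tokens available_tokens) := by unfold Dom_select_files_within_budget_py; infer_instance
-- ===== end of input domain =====

-- B replaces A's accumulate-and-break loop by a prefix-sum table, a leading-fit count and a slice (objective: alternative decomposition, same cost).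

-- ===== PORT A =====
-- the for-loop of A: running total 'cur', append while it fits, break otherwise
def pvGoA (avail : Int) : List (String × Int) → Int → List String
  | [], _ => []
  | (p, t) :: rest, cur =>
    if cur + t ≤ avail then p :: pvGoA avail rest (cur + t) else []

def select_files_within_budget_py (file_tokens : List (String × Int)) (available_tokens : Int) : List String :=
  pvGoA available_tokens (PySem.List.sorted file_tokens (fun x => x.2) false) 0

-- ===== PORT B =====
-- phase 1 of B: the prefix-sum table (running 'total', appending each new total)
def pvPrefixB : List (String × Int) → Int → List Int
  | [], _ => []
  | (_, t) :: rest, total => (total + t) :: pvPrefixB rest (total + t)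

-- phase 2 of B: the while-loop counting leading prefix sums ≤ budget
def pvCountB (avail : Int) : List Int → Nat
  | [] => 0
  | s :: rest => if s ≤ avail then pvCountB avail rest + 1 else 0

def select_files_within_budget_py_alt (file_tokens : List (String × Int)) (available_tokens : Int) : List String :=
  let items := PySem.List.sorted file_tokens (fun x => x.2) false
  let k := pvCountB available_tokens (pvPrefixB items 0)
  (items.take k).map (·.1)

-- ===== PRECONDITION & SPEC =====
def Spec_select_files_within_budget_py (file_tokens : List (String × Int)) (available_tokens : Int) (out : List String) : Prop := out = select_files_within_budget_py_alt file_tokens available_tokens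
instance (file_tokens : List (String × Int)) (available_tokens : Int) (out : List String) : Decidable (Spec_select_files_within_budget_py file_tokens available_tokens out) := by unfold Spec_select_files_within_budget_py; infer_instance

-- ===== CLAIM (what is proved, stated in full; the proofs are below) =====
def Claim_equal_select_files_within_budget_py : Prop := ∀ (file_tokens : List (String × Int)) (available_tokens : Int), Dom_select_files_within_budget_py file_tokens available_tokens → Spec_select_files_within_budget_py file_tokens available_tokens (select_files_within_budget_py file_tokens available_tokens)

-- ===== LEMMAS AND PROOFS =====
-- A's break-loop equals "take the leading-fit count of the prefix table, map fst", for any running total.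
theorem pvGoA_eq_take (avail : Int) (xs : List (String × Int)) :
    ∀ cur : Int, pvGoA avail xs cur
      = ((xs.take (pvCountB avail (pvPrefixB xs cur))).map (·.1)) := by
  induction xs with
  | nil => intro cur; simp [pvGoA, pvPrefixB, pvCountB]
  | cons hd rest ih =>
    intro cur
    obtain ⟨p, t⟩ := hd
    simp only [pvGoA, pvPrefixB, pvCountB]
    by_cases h : cur + t ≤ avail
    · simp [h, ih (cur + t), List.take_succ_cons]
    · simp [h]

-- ===== VERDICT (by name: the statement is the Claim_ definition above) =====
theorem select_files_within_budget_py_spec : Claim_equal_select_files_within_budget_py := by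
  intro file_tokens available_tokens _
  unfold Spec_select_files_within_budget_py select_files_within_budget_py select_files_within_budget_py_alt
  exact pvGoA_eq_take available_tokens _ 0
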